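-- pv_equiv track=rewrite | github.com/Tom-the-Bomb/CCC-Solutions | USACO/bronze/shell_game.py | shell_game
-- ===== SOURCE A (Python) =====
-- def shell_game(inp: str) -> int:
--     shells = [1, 2, 3]
--     _, *lines = inp.splitlines()
--
--     scores = [0, 0, 0]
--     for line in lines:
--         a, b, g = [int(x) for x in line.split()]
--         shells[a - 1], shells[b - 1] = shells[b - 1], shells[a - 1]
--         scores[shells[g - 1] - 1] += 1
--     return max(scores)
-- ===== SOURCE B (Python) =====
-- def shell_game(inp: str) -> int:
--     moves = inp.splitlines()[1:]
--     swaps = []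
--     for line in moves:
--         a, b, g = [int(x) for x in line.split()]
--         swaps.append((a, b, g))
--     best = 0
--     for ball in (1, 2, 3):
--         pos, count = ball, 0
--         for a, b, g in swaps:
--             if pos == a:
--                 pos = b
--             elif pos == b:
--                 pos = a
--             if pos == g:
--                 count += 1
--         if count > best:
--             best = count
--     return best
-- ===== Notes on version B (the rewrite author's own statement) =====
-- stated objective: alternative
-- what changed: A simulates all three shells in one pass over the lines with a shared position-to-ball array plus a score array; B parses the swaps once and then follows each ball independently in three per-ball passes that track a single position and count its guessed steps, combining the three counts with a running maximum.
-- outside the precondition, e.g. on shell_game('h\n0 2 2'): A returns 1, B returns 0; on shell_game('h\n1 2 0'): A returns 1, B returns 0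
import Mathlib
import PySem

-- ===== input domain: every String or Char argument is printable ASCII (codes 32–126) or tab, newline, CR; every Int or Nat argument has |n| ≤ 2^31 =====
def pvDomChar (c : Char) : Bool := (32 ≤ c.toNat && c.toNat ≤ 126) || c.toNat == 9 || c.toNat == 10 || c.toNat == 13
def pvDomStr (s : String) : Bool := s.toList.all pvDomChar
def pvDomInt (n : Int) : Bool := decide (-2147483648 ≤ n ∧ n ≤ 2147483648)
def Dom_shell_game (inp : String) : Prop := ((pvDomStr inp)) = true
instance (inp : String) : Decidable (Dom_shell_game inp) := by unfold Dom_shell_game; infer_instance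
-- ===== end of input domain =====

-- B replaces A's single pass over one shared position→ball array with three independent
-- per-ball position-tracking passes (objective: alternative decomposition, same cost class).

-- ===== PORT A =====
-- [int(x) for x in line.split()]
def pvToks (line : String) : Option (List Int) :=
  (PySem.Str.split₀ line).mapM PySem.Int.ofStr?

-- the body of A's loop after parsing: the double swap assignment and the score bump
def pvSwapScore (shells scores : List Int) (a b g : Int) :
    Option (List Int × List Int) :=
  match PySem.List.pyGet? shells (a - 1), PySem.List.pyGet? shells (b - 1) with
  | some sa, some sb =>
    match PySem.List.pySet? shells (a - 1) sb with
    | some sh1 =>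
      match PySem.List.pySet? sh1 (b - 1) sa with
      | some sh2 =>
        match PySem.List.pyGet? sh2 (g - 1) with
        | some w =>
          match PySem.List.pyGet? scores (w - 1) with
          | some c =>
            match PySem.List.pySet? scores (w - 1) (c + 1) with
            | some scores' => some (sh2, scores')
            | none => none
          | none => none
        | none => none
      | none => none
    | none => none
  | _, _ => none

def pvStepA (st : Option (List Int × List Int)) (line : String) :
    Option (List Int × List Int) :=
  match st with
  | none => none
  | some (shells, scores) =>
    match pvToks line with
    | some [a, b, g] => pvSwapScore shells scores a b g
    | _ => none

def shell_game (inp : String) : Int :=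
  match PySem.Str.splitlines inp with
  | [] => 0      -- Python raises ValueError here (unpacking); excluded by Pre_
  | _ :: lines =>
    match lines.foldl pvStepA (some ([1, 2, 3], [0, 0, 0])) with
    | some (_, scores) => (PySem.List.max? scores (fun y => y)).getD 0
    | none => 0  -- Python raised inside the loop; excluded by Pre_

-- ===== PORT B =====
-- a, b, g = [int(x) for x in line.split()]
def pvParse (line : String) : Option (Int × Int × Int) :=
  match pvToks line with
  | some [a, b, g] => some (a, b, g)
  | _ => none

-- one swap applied to one tracked ball position
def pvMoveB (pos a b : Int) : Int :=
  if pos = a then b else if pos = b then a else pos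

def pvStepB (pc : Int × Int) (m : Int × Int × Int) : Int × Int :=
  let pos := pvMoveB pc.1 m.1 m.2.1
  (pos, if pos = m.2.2 then pc.2 + 1 else pc.2)

def shell_game_alt (inp : String) : Int :=
  let moves := PySem.List.slice (PySem.Str.splitlines inp) (some 1) none
  match moves.mapM pvParse with
  | none => 0    -- Python raises ValueError here; excluded by Pre_
  | some swaps =>
    ([1, 2, 3] : List Int).foldl
      (fun best ball =>
        let pc := swaps.foldl pvStepB (ball, 0)
        if pc.2 > best then pc.2 else best) 0

-- ===== PRECONDITION & SPEC =====
def pvLineOK (line : String) : Bool :=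
  match pvToks line with
  | some [a, b, g] =>
    decide (1 ≤ a ∧ a ≤ 3 ∧ 1 ≤ b ∧ b ≤ 3 ∧ 1 ≤ g ∧ g ≤ 3)
  | _ => false

-- Pre_ admits exactly the well-formed Shell Game inputs: at least one line, and every line
-- after the first consisting of exactly three integers in 1..3 (the problem's move format).
-- It excludes inputs where A raises (no first line, unparsable lines, numbers outside -2..3)
-- and also inputs with shell/guess numbers in -2..0, which are not valid moves: there A still
-- returns via Python's negative indexing while B treats the number as matching no shell, and
-- neither value is specified for such malformed moves.
def Pre_shell_game (inp : String) : Prop :=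
  PySem.Str.splitlines inp ≠ [] ∧
  ((PySem.Str.splitlines inp).drop 1).all pvLineOK = true
instance (inp : String) : Decidable (Pre_shell_game inp) := by
  unfold Pre_shell_game; infer_instance

def pvWitness_shell_game : String := "2\n1 2 1\n3 2 2"

def Spec_shell_game (inp : String) (out : Int) : Prop := out = shell_game_alt inp
instance (inp : String) (out : Int) : Decidable (Spec_shell_game inp out) := by
  unfold Spec_shell_game; infer_instance

-- ===== CLAIM (what is proved, stated in full; the proofs are below) =====
def Claim_equal_shell_game : Prop :=
  ∀ (inp : String), Dom_shell_game inp → Pre_shell_game inp →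
    Spec_shell_game inp (shell_game inp)

-- ===== LEMMAS AND PROOFS =====

-- shells list determined by the three ball positions (position j holds ball k iff pk = j)
def pvShOf (p1 p2 p3 : Int) : List Int :=
  [if p1 = 1 then 1 else if p2 = 1 then 2 else 3,
   if p1 = 2 then 1 else if p2 = 2 then 2 else 3,
   if p1 = 3 then 1 else if p2 = 3 then 2 else 3]

def pvPermOK (p1 p2 p3 : Int) : Prop :=
  (p1 = 1 ∧ p2 = 2 ∧ p3 = 3) ∨ (p1 = 1 ∧ p2 = 3 ∧ p3 = 2) ∨
  (p1 = 2 ∧ p2 = 1 ∧ p3 = 3) ∨ (p1 = 2 ∧ p2 = 3 ∧ p3 = 1) ∨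
  (p1 = 3 ∧ p2 = 1 ∧ p3 = 2) ∨ (p1 = 3 ∧ p2 = 2 ∧ p3 = 1)

def pvOK (m : Int × Int × Int) : Prop :=
  1 ≤ m.1 ∧ m.1 ≤ 3 ∧ 1 ≤ m.2.1 ∧ m.2.1 ≤ 3 ∧ 1 ≤ m.2.2 ∧ m.2.2 ≤ 3

-- A's loop re-expressed over already-parsed triples
def pvFoldA (t : List (Int × Int × Int)) (st : Option (List Int × List Int)) :
    Option (List Int × List Int) :=
  t.foldl (fun st m =>
    match st with
    | none => none
    | some (sh, sc) => pvSwapScore sh sc m.1 m.2.1 m.2.2) st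

lemma pvFoldA_none (t : List (Int × Int × Int)) : pvFoldA t none = none := by
  induction t with
  | nil => rfl
  | cons m t ih => simpa [pvFoldA] using ih

-- one valid move: A's shared-array step is B's three position updates plus the right score bump
set_option maxHeartbeats 4000000 in
lemma pvStep_key (a b g : Int)
    (ha : 1 ≤ a ∧ a ≤ 3) (hb : 1 ≤ b ∧ b ≤ 3) (hg : 1 ≤ g ∧ g ≤ 3)
    (p1 p2 p3 : Int) (hp : pvPermOK p1 p2 p3) (c1 c2 c3 : Int) :
    pvSwapScore (pvShOf p1 p2 p3) [c1, c2, c3] a b g =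
      some (pvShOf (pvMoveB p1 a b) (pvMoveB p2 a b) (pvMoveB p3 a b),
        [c1 + (if pvMoveB p1 a b = g then 1 else 0),
         c2 + (if pvMoveB p2 a b = g then 1 else 0),
         c3 + (if pvMoveB p3 a b = g then 1 else 0)]) ∧
    pvPermOK (pvMoveB p1 a b) (pvMoveB p2 a b) (pvMoveB p3 a b) := by
  obtain ⟨ha1, ha2⟩ := ha
  obtain ⟨hb1, hb2⟩ := hb
  obtain ⟨hg1, hg2⟩ := hg
  interval_cases a <;> interval_cases b <;> interval_cases g <;>
    rcases hp with ⟨h1,h2,h3⟩|⟨h1,h2,h3⟩|⟨h1,h2,h3⟩|⟨h1,h2,h3⟩|⟨h1,h2,h3⟩|⟨h1,h2,h3⟩ <;>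
    subst h1 <;> subst h2 <;> subst h3 <;>
    simp [pvSwapScore, pvShOf, pvMoveB, pvPermOK, PySem.List.pyGet?,
      PySem.List.pySet?, PySem.List.pyIdx?]

lemma pvMain (t : List (Int × Int × Int)) (hok : ∀ m ∈ t, pvOK m) :
    ∀ p1 p2 p3, pvPermOK p1 p2 p3 → ∀ c1 c2 c3 : Int,
    pvFoldA t (some (pvShOf p1 p2 p3, [c1, c2, c3])) =
      some (pvShOf (t.foldl pvStepB (p1, c1)).1 (t.foldl pvStepB (p2, c2)).1
              (t.foldl pvStepB (p3, c3)).1,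
            [(t.foldl pvStepB (p1, c1)).2, (t.foldl pvStepB (p2, c2)).2,
             (t.foldl pvStepB (p3, c3)).2]) ∧
    pvPermOK (t.foldl pvStepB (p1, c1)).1 (t.foldl pvStepB (p2, c2)).1
      (t.foldl pvStepB (p3, c3)).1 := by
  induction t with
  | nil =>
    intro p1 p2 p3 hp c1 c2 c3
    exact ⟨rfl, hp⟩
  | cons m ms ih =>
    rcases m with ⟨a, b, g⟩
    intro p1 p2 p3 hp c1 c2 c3
    obtain ⟨h1, h2, h3, h4, h5, h6⟩ := hok (a, b, g) List.mem_cons_self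
    have hstep := pvStep_key a b g ⟨h1, h2⟩ ⟨h3, h4⟩ ⟨h5, h6⟩ p1 p2 p3 hp c1 c2 c3
    have hstepB : ∀ p c : Int, pvStepB (p, c) (a, b, g) =
        (pvMoveB p a b, c + (if pvMoveB p a b = g then 1 else 0)) := by
      intro p c
      simp only [pvStepB]
      split_ifs <;> simp
    have hrest := ih (fun m hm => hok m (List.mem_cons_of_mem _ hm))
      (pvMoveB p1 a b) (pvMoveB p2 a b) (pvMoveB p3 a b) hstep.2
      (c1 + (if pvMoveB p1 a b = g then 1 else 0))
      (c2 + (if pvMoveB p2 a b = g then 1 else 0))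
      (c3 + (if pvMoveB p3 a b = g then 1 else 0))
    have hL : pvFoldA ((a, b, g) :: ms) (some (pvShOf p1 p2 p3, [c1, c2, c3]))
        = pvFoldA ms (pvSwapScore (pvShOf p1 p2 p3) [c1, c2, c3] a b g) := rfl
    constructor
    · rw [hL, hstep.1, hrest.1, List.foldl_cons, List.foldl_cons, List.foldl_cons,
        hstepB, hstepB, hstepB]
    · rw [List.foldl_cons, List.foldl_cons, List.foldl_cons, hstepB, hstepB, hstepB]
      exact hrest.2

lemma pvBridge (lines : List String) (h : lines.all pvLineOK = true) :
    ∃ t, lines.mapM pvParse = some t ∧ (∀ m ∈ t, pvOK m) ∧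
      ∀ st, lines.foldl pvStepA st = pvFoldA t st := by
  induction lines with
  | nil => exact ⟨[], rfl, by simp, fun st => rfl⟩
  | cons l ls ih =>
    simp only [List.all_cons, Bool.and_eq_true] at h
    obtain ⟨h1, h2⟩ := h
    obtain ⟨t, hmap, htok, hfold⟩ := ih h2
    unfold pvLineOK at h1
    cases htoks : pvToks l with
    | none => rw [htoks] at h1; simp at h1
    | some toks =>
      rw [htoks] at h1
      match toks, h1 with
      | [a, b, g], h1 =>
        have hp : pvParse l = some (a, b, g) := by simp [pvParse, htoks]
        have hok : pvOK (a, b, g) := by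
          simp only [decide_eq_true_eq] at h1
          exact ⟨h1.1, h1.2.1, h1.2.2.1, h1.2.2.2.1, h1.2.2.2.2.1, h1.2.2.2.2.2⟩
        refine ⟨(a, b, g) :: t, ?_, ?_, ?_⟩
        · simp [List.mapM_cons, hp, hmap]
        · intro m hm
          rcases List.mem_cons.mp hm with rfl | hm
          · exact hok
          · exact htok m hm
        · intro st
          cases st with
          | none =>
            simp only [List.foldl_cons, pvStepA]
            rw [hfold none, pvFoldA_none, pvFoldA_none]
          | some p =>
            obtain ⟨sh, sc⟩ := p
            simp only [List.foldl_cons, pvStepA, htoks]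
            rw [hfold]
            rfl

lemma pvCount_le (t : List (Int × Int × Int)) :
    ∀ p c, c ≤ (t.foldl pvStepB (p, c)).2 := by
  induction t with
  | nil => intro p c; simp
  | cons m t ih =>
    intro p c
    simp only [List.foldl_cons]
    refine le_trans ?_ (by
      have := ih (pvStepB (p, c) m).1 (pvStepB (p, c) m).2
      simpa using this)
    simp only [pvStepB]
    split <;> omega

lemma pvMax3 (s1 s2 s3 : Int) (h1 : 0 ≤ s1) (h2 : 0 ≤ s2) (h3 : 0 ≤ s3) :
    (PySem.List.max? [s1, s2, s3] (fun y => y)).getD 0 =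
      (if s3 > (if s2 > (if s1 > 0 then s1 else 0) then s2 else (if s1 > 0 then s1 else 0))
        then s3 else (if s2 > (if s1 > 0 then s1 else 0) then s2 else (if s1 > 0 then s1 else 0))) := by
  rw [PySem.List.max?_id_cons]
  simp only [List.foldl_cons, List.foldl_nil, Option.getD_some]
  split_ifs <;> omega

lemma pvA_eval (inp : String) (hd : String) (lines : List String)
    (sh scores : List Int) (h : PySem.Str.splitlines inp = hd :: lines)
    (hf : lines.foldl pvStepA (some ([1, 2, 3], [0, 0, 0])) = some (sh, scores)) :
    shell_game inp = (PySem.List.max? scores (fun y => y)).getD 0 := by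
  unfold shell_game
  rw [h]
  show (match lines.foldl pvStepA (some ([1, 2, 3], [0, 0, 0])) with
        | some (_, scores) => (PySem.List.max? scores (fun y => y)).getD 0
        | none => 0) = _
  rw [hf]

lemma pvB_eval (inp : String) (hd : String) (lines : List String)
    (swaps : List (Int × Int × Int)) (h : PySem.Str.splitlines inp = hd :: lines)
    (hm : lines.mapM pvParse = some swaps) :
    shell_game_alt inp =
      ([1, 2, 3] : List Int).foldl
        (fun best ball =>
          let pc := swaps.foldl pvStepB (ball, 0)
          if pc.2 > best then pc.2 else best) 0 := by
  unfold shell_game_alt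
  rw [h, PySem.List.slice_from_one, List.tail_cons]
  show (match lines.mapM pvParse with
        | none => 0
        | some swaps =>
          ([1, 2, 3] : List Int).foldl
            (fun best ball =>
              let pc := swaps.foldl pvStepB (ball, 0)
              if pc.2 > best then pc.2 else best) 0) = _
  rw [hm]

-- ===== VERDICT (by name: the statement is the Claim_ definition above) =====
theorem shell_game_spec : Claim_equal_shell_game := by
  intro inp _ hPre
  obtain ⟨hne, hall⟩ := hPre
  unfold Spec_shell_game
  cases hsplit : PySem.Str.splitlines inp with
  | nil => exact absurd hsplit hne
  | cons hd lines =>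
    rw [hsplit] at hall
    simp only [List.drop_succ_cons, List.drop_zero] at hall
    obtain ⟨t, hmap, htok, hfold⟩ := pvBridge lines hall
    have hmain := pvMain t htok 1 2 3 (Or.inl ⟨rfl, rfl, rfl⟩) 0 0 0
    have hsh : pvShOf 1 2 3 = [1, 2, 3] := by decide
    rw [hsh] at hmain
    have hA : lines.foldl pvStepA (some ([1, 2, 3], [0, 0, 0])) =
        some (pvShOf (t.foldl pvStepB (1, 0)).1 (t.foldl pvStepB (2, 0)).1
                (t.foldl pvStepB (3, 0)).1,
              [(t.foldl pvStepB (1, 0)).2, (t.foldl pvStepB (2, 0)).2,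
               (t.foldl pvStepB (3, 0)).2]) := by
      rw [hfold]; exact hmain.1
    rw [pvA_eval inp hd lines _ _ hsplit hA, pvB_eval inp hd lines t hsplit hmap,
      pvMax3 _ _ _ (pvCount_le t 1 0) (pvCount_le t 2 0) (pvCount_le t 3 0)]
    rfl
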